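-- pv_equiv track=rewrite | github.com/DVampire/LeetCodePro | 3739.count-subarrays-with-majority-element-ii.py | countMajoritySubarrays
-- ===== SOURCE A (Python) =====
-- from typing import List
--
-- def countMajoritySubarrays(nums: List[int], target: int) -> int:
--     n = len(nums)
--     # The prefix sums range from -n to n.
--     # We use an offset of n to map this range to 0 to 2n.
--     offset = n
--     freq = [0] * (2 * n + 1)
--
--     ans = 0
--     cur_P = 0 # Represents the current prefix sum P_k
--     freq[cur_P + offset] = 1 # Initial prefix sum P_0 = 0
--     smaller_counts = 0 # Number of previous prefix sums P_i < cur_P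
--
--     for x in nums:
--         if x == target:
--             # Prefix sum increases: P_{k+1} = P_k + 1
--             # The number of i <= k such that P_i < P_{k+1} is:
--             # count(P_i < P_k) + count(P_i == P_k)
--             smaller_counts += freq[cur_P + offset]
--             cur_P += 1
--         else:
--             # Prefix sum decreases: P_{k+1} = P_k - 1
--             # The number of i <= k such that P_i < P_{k+1} is:
--             # count(P_i < P_k) - count(P_i == P_k - 1)
--             cur_P -= 1
--             smaller_counts -= freq[cur_P + offset]
--
--         # Add the number of valid starting indices i for the current end index k
--         ans += smaller_counts
--         # Update the frequency of the newly reached prefix sum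
--         freq[cur_P + offset] += 1
--
--     return ans
-- ===== SOURCE B (Python) =====
-- def countMajoritySubarrays(nums, target):
--     ans = 0
--     p = 0
--     seen = [0]  # all prefix sums seen so far (P_0 .. P_k)
--     for x in nums:
--         p += 1 if x == target else -1
--         ans += sum(1 for q in seen if q < p)
--         seen.append(p)
--     return ans
-- ===== Notes on version B (the rewrite author's own statement) =====
-- stated objective: simpler
-- what changed: Replaces the incrementally-maintained smaller_counts counter and offset frequency array with a direct count: keep the list of all previous prefix sums and, for each new prefix sum, count the strictly smaller ones by a plain scan.
import Mathlib
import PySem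

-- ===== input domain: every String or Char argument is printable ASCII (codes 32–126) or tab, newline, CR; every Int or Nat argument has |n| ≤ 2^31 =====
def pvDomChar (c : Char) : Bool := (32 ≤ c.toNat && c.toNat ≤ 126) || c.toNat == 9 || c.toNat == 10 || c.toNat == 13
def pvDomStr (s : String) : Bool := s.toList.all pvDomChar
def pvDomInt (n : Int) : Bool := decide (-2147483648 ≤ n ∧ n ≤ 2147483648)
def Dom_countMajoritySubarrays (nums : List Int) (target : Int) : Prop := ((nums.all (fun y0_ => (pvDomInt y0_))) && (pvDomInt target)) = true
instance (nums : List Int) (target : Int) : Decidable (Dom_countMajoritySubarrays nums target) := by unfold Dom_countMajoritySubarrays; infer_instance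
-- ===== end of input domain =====

-- B replaces A's incrementally-maintained smaller_counts counter and offset frequency
-- array by a plain list of all previous prefix sums scanned directly at each step
-- (simpler decomposition; not faster).


-- ===== PORT A =====
-- loop state: (ans, cur_P, smaller_counts, freq); the indices cur_P + offset are
-- always in range (|cur_P| ≤ n), so the total pyGetD/pySetD forms are exact here.
def countMajoritySubarraysAStep (target off : Int) (st : Int × Int × Int × List Int) (x : Int) :
    Int × Int × Int × List Int :=
  let ans := st.1; let curP := st.2.1; let smaller := st.2.2.1; let freq := st.2.2.2
  let cs : Int × Int :=
    if x = target then
      (curP + 1, smaller + PySem.List.pyGetD freq (curP + off) 0)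
    else
      let curP2 := curP - 1
      (curP2, smaller - PySem.List.pyGetD freq (curP2 + off) 0)
  let curP2 := cs.1; let smaller2 := cs.2
  let ans2 := ans + smaller2
  let freq2 := PySem.List.pySetD freq (curP2 + off) (PySem.List.pyGetD freq (curP2 + off) 0 + 1)
  (ans2, curP2, smaller2, freq2)

def countMajoritySubarrays (nums : List Int) (target : Int) : Int :=
  let n : Int := nums.length
  let offset := n
  let freq0 : List Int := List.replicate (2 * nums.length + 1) 0
  let freq : List Int := PySem.List.pySetD freq0 (0 + offset) 1
  (nums.foldl (countMajoritySubarraysAStep target offset) (0, 0, 0, freq)).1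

-- ===== PORT B =====
-- loop state: (ans, p, seen) with seen = all prefix sums seen so far
def countMajoritySubarraysBStep (target : Int) (st : Int × Int × List Int) (x : Int) :
    Int × Int × List Int :=
  let p := st.2.1 + (if x = target then 1 else -1)
  (st.1 + ((st.2.2.filter (fun q => decide (q < p))).length : Int), p, st.2.2 ++ [p])

def countMajoritySubarrays_alt (nums : List Int) (target : Int) : Int :=
  (nums.foldl (countMajoritySubarraysBStep target) (0, 0, [0])).1

-- ===== PRECONDITION & SPEC =====
def Spec_countMajoritySubarrays (nums : List Int) (target : Int) (out : Int) : Prop := out = countMajoritySubarrays_alt nums target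
instance (nums : List Int) (target : Int) (out : Int) : Decidable (Spec_countMajoritySubarrays nums target out) := by unfold Spec_countMajoritySubarrays; infer_instance

-- ===== CLAIM (what is proved, stated in full; the proofs are below) =====
def Claim_equal_countMajoritySubarrays : Prop := ∀ (nums : List Int) (target : Int), Dom_countMajoritySubarrays nums target → Spec_countMajoritySubarrays nums target (countMajoritySubarrays nums target)

-- ===== LEMMAS AND PROOFS =====

-- #{q ∈ seen : q < p+1} = #{q ∈ seen : q < p} + #{q ∈ seen : q = p}
lemma countLess_split (p : Int) (seen : List Int) :
    (seen.filter (fun q => decide (q < p + 1))).length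
      = (seen.filter (fun q => decide (q < p))).length + seen.count p := by
  induction seen with
  | nil => simp
  | cons a t ih =>
      rw [List.filter_cons, List.filter_cons, List.count_cons]
      simp only [decide_eq_true_eq, beq_iff_eq]
      split_ifs <;> (try simp only [List.length_cons]) <;> omega

-- #{q ∈ seen : q < p} = #{q ∈ seen : q < p-1} + #{q ∈ seen : q = p-1}
lemma countLess_split_dec (p : Int) (seen : List Int) :
    (seen.filter (fun q => decide (q < p))).length
      = (seen.filter (fun q => decide (q < p - 1))).length + seen.count (p - 1) := by
  have := countLess_split (p - 1) seen
  simpa using this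

-- pyGetD after pySetD, for nonneg Int indices
lemma pyGetD_pySetD_int (xs : List Int) (i m w d : Int)
    (h0 : 0 ≤ i) (h0m : 0 ≤ m) (h1 : i.toNat < xs.length) :
    PySem.List.pyGetD (PySem.List.pySetD xs i w) m d
      = if m = i then w else PySem.List.pyGetD xs m d := by
  rw [← Int.toNat_of_nonneg h0, ← Int.toNat_of_nonneg h0m,
      PySem.List.pyGetD_pySetD_natCast xs i.toNat m.toNat w d h1]
  by_cases h : m.toNat = i.toNat
  · rw [if_pos h, if_pos (show ((m.toNat : Int)) = ((i.toNat : Int)) by omega)]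
  · rw [if_neg h, if_neg (show ¬ ((m.toNat : Int)) = ((i.toNat : Int)) by omega)]

lemma getD_repl (n : Nat) (i : Int) (h0 : 0 ≤ i) :
    PySem.List.pyGetD (List.replicate n (0:Int)) i 0 = 0 := by
  rw [← Int.toNat_of_nonneg h0, PySem.List.pyGetD_natCast]
  rcases Nat.lt_or_ge i.toNat n with h | h
  · rw [List.getD_eq_getElem _ _ (by simpa using h)]; simp
  · rw [List.getD_eq_default _ _ (by simpa using h)]

lemma aStep_pos (target off ans curP smaller : Int) (freq : List Int) (x : Int) (hx : x = target) :
    countMajoritySubarraysAStep target off (ans, curP, smaller, freq) x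
      = (ans + (smaller + PySem.List.pyGetD freq (curP + off) 0), curP + 1,
         smaller + PySem.List.pyGetD freq (curP + off) 0,
         PySem.List.pySetD freq (curP + 1 + off) (PySem.List.pyGetD freq (curP + 1 + off) 0 + 1)) := by
  subst hx; simp [countMajoritySubarraysAStep]

lemma aStep_neg (target off ans curP smaller : Int) (freq : List Int) (x : Int) (hx : ¬ x = target) :
    countMajoritySubarraysAStep target off (ans, curP, smaller, freq) x
      = (ans + (smaller - PySem.List.pyGetD freq (curP - 1 + off) 0), curP - 1,
         smaller - PySem.List.pyGetD freq (curP - 1 + off) 0,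
         PySem.List.pySetD freq (curP - 1 + off) (PySem.List.pyGetD freq (curP - 1 + off) 0 + 1)) := by
  simp [countMajoritySubarraysAStep, hx]

lemma bStep_pos (target ans p : Int) (seen : List Int) (x : Int) (hx : x = target) :
    countMajoritySubarraysBStep target (ans, p, seen) x
      = (ans + ((seen.filter (fun q => decide (q < p + 1))).length : Int), p + 1, seen ++ [p + 1]) := by
  subst hx; simp [countMajoritySubarraysBStep]

lemma bStep_neg (target ans p : Int) (seen : List Int) (x : Int) (hx : ¬ x = target) :
    countMajoritySubarraysBStep target (ans, p, seen) x
      = (ans + ((seen.filter (fun q => decide (q < p - 1))).length : Int), p - 1, seen ++ [p - 1]) := by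
  simp [countMajoritySubarraysBStep, hx, sub_eq_add_neg]

-- main loop invariant: once smaller = #{q ∈ seen : q < curP} and freq is seen's
-- histogram (offset by N), the two folds keep equal answers
lemma loop_eq (target : Int) (N : Nat) :
    ∀ (rest : List Int) (ans curP smaller : Int) (freq seen : List Int),
      freq.length = 2 * N + 1 →
      curP.natAbs + rest.length ≤ N →
      smaller = ((seen.filter (fun q => decide (q < curP))).length : Int) →
      (∀ v : Int, v.natAbs ≤ N → PySem.List.pyGetD freq (v + (N : Int)) 0 = (seen.count v : Int)) →
      (rest.foldl (countMajoritySubarraysAStep target (N : Int)) (ans, curP, smaller, freq)).1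
        = (rest.foldl (countMajoritySubarraysBStep target) (ans, curP, seen)).1 := by
  intro rest
  induction rest with
  | nil => intro ans curP smaller freq seen _ _ _ _; rfl
  | cons x rest ih =>
      intro ans curP smaller freq seen hlen hbnd hs hf
      have hbnd' : curP.natAbs + rest.length + 1 ≤ N := by simpa using hbnd
      simp only [List.foldl_cons]
      by_cases hx : x = target
      · rw [aStep_pos target (N:Int) ans curP smaller freq x hx,
           bStep_pos target ans curP seen x hx]
        have hsm : smaller + PySem.List.pyGetD freq (curP + (N:Int)) 0
            = (((seen.filter (fun q => decide (q < curP + 1))).length : Nat) : Int) := by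
          rw [hf curP (by omega), hs, countLess_split curP seen]
          push_cast; ring
        rw [hsm]
        refine ih _ _ _ _ _ ?_ ?_ ?_ ?_
        · rw [PySem.List.length_pySetD]; exact hlen
        · omega
        · simp [List.filter_append]
        · intro v hv
          rw [pyGetD_pySetD_int freq (curP + 1 + (N:Int)) (v + (N:Int)) _ 0
                (by omega) (by omega) (by omega)]
          by_cases hvc : v = curP + 1
          · rw [if_pos (by omega), hf (curP + 1) (by omega)]
            subst hvc
            simp [List.count_append]
          · rw [if_neg (by omega), hf v (by omega)]
            have h0 : List.count v [curP + 1] = 0 := by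
              rw [List.count_eq_zero]; simpa using hvc
            simp [List.count_append, h0]
      · rw [aStep_neg target (N:Int) ans curP smaller freq x hx,
           bStep_neg target ans curP seen x hx]
        have hsm : smaller - PySem.List.pyGetD freq (curP - 1 + (N:Int)) 0
            = (((seen.filter (fun q => decide (q < curP - 1))).length : Nat) : Int) := by
          rw [hf (curP - 1) (by omega), hs, countLess_split_dec curP seen]
          push_cast; ring
        rw [hsm]
        refine ih _ _ _ _ _ ?_ ?_ ?_ ?_
        · rw [PySem.List.length_pySetD]; exact hlen
        · omega
        · simp [List.filter_append]
        · intro v hv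
          rw [pyGetD_pySetD_int freq (curP - 1 + (N:Int)) (v + (N:Int)) _ 0
                (by omega) (by omega) (by omega)]
          by_cases hvc : v = curP - 1
          · rw [if_pos (by omega), hf (curP - 1) (by omega)]
            subst hvc
            simp [List.count_append]
          · rw [if_neg (by omega), hf v (by omega)]
            have h0 : List.count v [curP - 1] = 0 := by
              rw [List.count_eq_zero]; simpa using hvc
            simp [List.count_append, h0]

-- ===== VERDICT (by name: the statement is the Claim_ definition above) =====
theorem countMajoritySubarrays_spec : Claim_equal_countMajoritySubarrays := by
  unfold Claim_equal_countMajoritySubarrays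
  intro nums target _
  unfold Spec_countMajoritySubarrays countMajoritySubarrays countMajoritySubarrays_alt
  refine loop_eq target nums.length nums 0 0 0
      (PySem.List.pySetD (List.replicate (2 * nums.length + 1) 0) (0 + (nums.length : Int)) 1)
      [0] ?_ (by omega) (by decide) ?_
  · rw [PySem.List.length_pySetD, List.length_replicate]
  · intro v hv
    rw [pyGetD_pySetD_int _ (0 + (nums.length : Int)) (v + (nums.length : Int)) 1 0
          (by omega) (by omega) (by simp; omega)]
    by_cases hv0 : v = 0
    · rw [if_pos (by omega)]; subst hv0; decide
    · rw [if_neg (by omega), getD_repl _ _ (by omega)]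
      have h0 : List.count v [0] = 0 := by
        rw [List.count_eq_zero]; simpa using hv0
      simp [h0]
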